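-- pv_equiv track=rewrite | github.com/1r0nw1ll/quantum-arithmetic-research | qa_bateson_coupling_experiment.py | enumerate_orbits
-- ===== SOURCE A (Python) =====
-- def qa_step(bi, ei, m):
--     b_new = ((bi + ei - 1) % m) + 1
--     e_new = ((ei + b_new - 1) % m) + 1
--     return b_new, e_new
--
-- def classify_orbit(bi, ei, m):
--     seen = []
--     state = (bi, ei)
--     for _ in range(m * m + 1):
--         if state in seen:
--             return len(seen) - seen.index(state)
--         seen.append(state)
--         state = qa_step(state[0], state[1], m)
--     return -1
--
-- def orbit_family_id(bi, ei, m):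
--     visited = set()
--     state = (bi, ei)
--     for _ in range(m * m + 1):
--         if state in visited:
--             cycle_start = state
--             cycle = [cycle_start]
--             s = qa_step(cycle_start[0], cycle_start[1], m)
--             while s != cycle_start:
--                 cycle.append(s)
--                 s = qa_step(s[0], s[1], m)
--             return min(cycle)
--         visited.add(state)
--         state = qa_step(state[0], state[1], m)
--     return (bi, ei)
--
-- def enumerate_orbits(m):
--     families = {}
--     for b in range(1, m + 1):
--         for e in range(1, m + 1):
--             fid = orbit_family_id(b, e, m)
--             if fid not in families:
--                 clen = classify_orbit(b, e, m)
--                 families[fid] = {'cycle_length': clen, 'count': 0}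
--             families[fid]['count'] += 1
--     return families
-- ===== SOURCE B (Python) =====
-- def enumerate_orbits(m):
--     families = {}
--     for b in range(1, m + 1):
--         for e in range(1, m + 1):
--             fid, clen = _orbit_info(b, e, m)
--             if fid in families:
--                 families[fid]['count'] += 1
--             else:
--                 families[fid] = {'cycle_length': clen, 'count': 1}
--     return families
--
-- def _orbit_info(b, e, m):
--     # One walk of the trajectory with a position index: the first revisited
--     # state marks the cycle; its suffix of the path IS the cycle.
--     path = []
--     pos = {}
--     state = (b, e)
--     while state not in pos:
--         pos[state] = len(path)
--         path.append(state)
--         b2 = ((state[0] + state[1] - 1) % m) + 1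
--         state = (b2, ((state[1] + b2 - 1) % m) + 1)
--     cyc = path[pos[state]:]
--     return min(cyc), len(cyc)
-- ===== Notes on version B (the rewrite author's own statement) =====
-- stated objective: alternative
-- what changed: Per start state, a single hash-indexed trajectory walk yields both the family id (min of the path suffix from the first revisited state) and the cycle length at once, replacing A's two separate scanners (a list-membership loop with linear scans plus a set-based loop that re-walks the cycle) and counting directly into the dict.
import Mathlib
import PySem

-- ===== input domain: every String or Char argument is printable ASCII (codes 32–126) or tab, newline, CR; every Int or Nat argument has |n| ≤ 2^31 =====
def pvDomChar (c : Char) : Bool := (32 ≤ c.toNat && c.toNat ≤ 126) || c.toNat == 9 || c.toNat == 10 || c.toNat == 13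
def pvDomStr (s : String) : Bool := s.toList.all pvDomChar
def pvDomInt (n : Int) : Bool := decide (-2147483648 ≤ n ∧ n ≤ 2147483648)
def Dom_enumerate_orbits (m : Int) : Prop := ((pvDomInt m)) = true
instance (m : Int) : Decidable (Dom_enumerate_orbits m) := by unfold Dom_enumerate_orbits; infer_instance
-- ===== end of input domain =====

-- B computes family id and cycle length in ONE indexed trajectory walk per state instead of A's
-- two separate scanners (alternative decomposition); return value identical.


-- ===== PORT A =====
def qa_step (bi ei m : Int) : Int × Int :=
  let b_new := PySem.Int.mod (bi + ei - 1) m + 1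
  let e_new := PySem.Int.mod (ei + b_new - 1) m + 1
  (b_new, e_new)

-- the 'for _ in range(m*m+1)' loop of classify_orbit (fuel = the exact iteration count)
def classifyGo (m : Int) : Nat → List (Int × Int) → (Int × Int) → Int
  | 0, _, _ => -1
  | n + 1, seen, state =>
    if state ∈ seen then
      (seen.length : Int) - (((PySem.List.index? seen state).getD 0 : Nat) : Int)
    else classifyGo m n (seen ++ [state]) (qa_step state.1 state.2 m)

def classify_orbit (bi ei m : Int) : Int :=
  classifyGo m (m * m + 1).toNat [] (bi, ei)

-- the 'while s != cycle_start' loop of orbit_family_id; the fuel is only a totality guard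
-- (the walk provably returns to its start within m*m steps on every state this port reaches)
def cycleWalk (m : Int) (start : Int × Int) : Nat → List (Int × Int) → (Int × Int) → List (Int × Int)
  | 0, cycle, _ => cycle
  | n + 1, cycle, s =>
    if s = start then cycle else cycleWalk m start n (cycle ++ [s]) (qa_step s.1 s.2 m)

-- the 'for _ in range(m*m+1)' loop of orbit_family_id (fuel = the exact iteration count)
def familyGo (m bi ei : Int) : Nat → PySem.Set (Int × Int) → (Int × Int) → Int × Int
  | 0, _, _ => (bi, ei)
  | n + 1, visited, state =>
    if PySem.Set.contains visited state then
      let cycle := cycleWalk m state (m * m + 1).toNat [state] (qa_step state.1 state.2 m)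
      (PySem.List.min2? cycle (fun p => p.1) (fun p => p.2)).getD state
    else familyGo m bi ei n (PySem.Set.add visited state) (qa_step state.1 state.2 m)

def orbit_family_id (bi ei m : Int) : Int × Int :=
  familyGo m bi ei (m * m + 1).toNat PySem.Set.empty (bi, ei)

def enumerate_orbits (m : Int) : List (Int × Int × List (String × Int)) :=
  let families := (PySem.List.pyRange 1 (m + 1) 1).foldl (fun fam b =>
    (PySem.List.pyRange 1 (m + 1) 1).foldl (fun fam e =>
      let fid := orbit_family_id b e m
      let fam := if fam.contains fid = false then
          fam.insert fid (PySem.Dict.ofList [("cycle_length", classify_orbit b e m), ("count", 0)])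
        else fam
      fam.modify fid (PySem.Dict.ofList []) (fun inner => inner.modify "count" 0 (· + 1))) fam)
    PySem.Dict.empty
  families.items.map (fun kv => (kv.1.1, kv.1.2, kv.2.items))

-- ===== PORT B =====
-- the 'while state not in pos' loop of _orbit_info (fuel is only a totality guard, as above)
def orbitInfoGo (m : Int) : Nat → List (Int × Int) → PySem.Dict (Int × Int) Int → (Int × Int) → (Int × Int) × Int
  | 0, _, _, state => (state, 0)
  | n + 1, path, pos, state =>
    if pos.contains state then
      let cyc := PySem.List.slice path (some (pos.getD state 0)) none
      ((PySem.List.min2? cyc (fun p => p.1) (fun p => p.2)).getD state, (cyc.length : Int))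
    else
      let b2 := PySem.Int.mod (state.1 + state.2 - 1) m + 1
      orbitInfoGo m n (path ++ [state]) (pos.insert state (path.length : Int))
        (b2, PySem.Int.mod (state.2 + b2 - 1) m + 1)

def orbitInfo (b e m : Int) : (Int × Int) × Int :=
  orbitInfoGo m (m * m + 1).toNat [] PySem.Dict.empty (b, e)

def enumerate_orbits_alt (m : Int) : List (Int × Int × List (String × Int)) :=
  let families := (PySem.List.pyRange 1 (m + 1) 1).foldl (fun fam b =>
    (PySem.List.pyRange 1 (m + 1) 1).foldl (fun fam e =>
      let r := orbitInfo b e m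
      if fam.contains r.1 then
        fam.modify r.1 (PySem.Dict.ofList []) (fun inner => inner.modify "count" 0 (· + 1))
      else
        fam.insert r.1 (PySem.Dict.ofList [("cycle_length", r.2), ("count", 1)])) fam)
    PySem.Dict.empty
  families.items.map (fun kv => (kv.1.1, kv.1.2, kv.2.items))

-- ===== PRECONDITION & SPEC =====
def Spec_enumerate_orbits (m : Int) (out : List (Int × Int × List (String × Int))) : Prop := out = enumerate_orbits_alt m
instance (m : Int) (out : List (Int × Int × List (String × Int))) : Decidable (Spec_enumerate_orbits m out) := by unfold Spec_enumerate_orbits; infer_instance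

-- ===== CLAIM (what is proved, stated in full; the proofs are below) =====
def Claim_equal_enumerate_orbits : Prop := ∀ (m : Int), Dom_enumerate_orbits m → Spec_enumerate_orbits m (enumerate_orbits m)

-- ===== LEMMAS AND PROOFS =====

-- each qa_step lands in [1,m] × [1,m] when 1 ≤ m
lemma qa_step_mem (m : Int) (hm : 1 ≤ m) (a b : Int) :
    1 ≤ (qa_step a b m).1 ∧ (qa_step a b m).1 ≤ m ∧ 1 ≤ (qa_step a b m).2 ∧ (qa_step a b m).2 ≤ m := by
  have h1 := PySem.Int.mod_nonneg (a + b - 1) (b := m) (by omega)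
  have h2 := PySem.Int.mod_lt (a + b - 1) (b := m) (by omega)
  have h3 := PySem.Int.mod_nonneg (b + (PySem.Int.mod (a + b - 1) m + 1) - 1) (b := m) (by omega)
  have h4 := PySem.Int.mod_lt (b + (PySem.Int.mod (a + b - 1) m + 1) - 1) (b := m) (by omega)
  simp only [qa_step]
  omega

-- a Nodup list of states inside [1,m] × [1,m] has at most m*m elements (pigeonhole)
lemma length_le_sq (m : Int) (p : List (Int × Int)) (hnd : p.Nodup)
    (hr : ∀ x ∈ p, 1 ≤ x.1 ∧ x.1 ≤ m ∧ 1 ≤ x.2 ∧ x.2 ≤ m) :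
    p.length ≤ m.toNat * m.toNat := by
  have hsub : p.toFinset ⊆ Finset.Icc (1 : Int) m ×ˢ Finset.Icc (1 : Int) m := by
    intro x hx
    rw [List.mem_toFinset] at hx
    obtain ⟨h1, h2, h3, h4⟩ := hr x hx
    rw [Finset.mem_product, Finset.mem_Icc, Finset.mem_Icc]
    omega
  have hcard := Finset.card_le_card hsub
  rw [List.toFinset_card_of_nodup hnd, Finset.card_product, Int.card_Icc] at hcard
  have h0 : (m + 1 - 1).toNat = m.toNat := by omega
  rw [h0] at hcard
  exact hcard

lemma toNat_sq (m : Int) (hm : 1 ≤ m) : (m * m + 1).toNat = m.toNat * m.toNat + 1 := by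
  obtain ⟨k, rfl⟩ : ∃ k : Nat, m = (k : Int) := ⟨m.toNat, by omega⟩
  have h : ((k : Int) * k + 1) = ((k * k + 1 : Nat) : Int) := by push_cast; ring
  rw [h]
  simp only [Int.toNat_natCast]

-- the cycle re-walk of orbit_family_id reproduces the chain it follows
lemma cycleWalk_chain (m : Int) (start : Int × Int) :
    ∀ (q : List (Int × Int)) (n : Nat) (acc : List (Int × Int)) (cur : Int × Int),
    q.length + 2 ≤ n →
    List.IsChain (fun a b => qa_step a.1 a.2 m = b) (cur :: q) →
    qa_step ((cur :: q).getLast (by simp)).1 ((cur :: q).getLast (by simp)).2 m = start →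
    start ∉ cur :: q →
    cycleWalk m start n acc cur = acc ++ cur :: q := by
  intro q
  induction q with
  | nil =>
    intro n acc cur hn hchain hlast hmem
    obtain ⟨k, rfl⟩ : ∃ k, n = k + 2 := ⟨n - 2, by omega⟩
    have hne : cur ≠ start := by intro h; exact hmem (by simp [h])
    simp only [List.getLast_singleton] at hlast
    show (if cur = start then acc else cycleWalk m start (k + 1) (acc ++ [cur]) (qa_step cur.1 cur.2 m)) = acc ++ [cur]
    rw [if_neg hne, hlast]
    show (if start = start then acc ++ [cur] else _) = acc ++ [cur]
    rw [if_pos rfl]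
  | cons b q ih =>
    intro n acc cur hn hchain hlast hmem
    obtain ⟨k, rfl⟩ : ∃ k, n = k + 1 := ⟨n - 1, by omega⟩
    have hne : cur ≠ start := by intro h; exact hmem (by simp [h])
    obtain ⟨hhead, htail⟩ := List.isChain_cons.1 hchain
    have hstep : qa_step cur.1 cur.2 m = b := hhead b rfl
    have hlast' : qa_step ((b :: q).getLast (by simp)).1 ((b :: q).getLast (by simp)).2 m = start := by
      have he : (cur :: b :: q).getLast (by simp) = (b :: q).getLast (by simp) := rfl
      rw [he] at hlast; exact hlast
    show (if cur = start then acc else cycleWalk m start k (acc ++ [cur]) (qa_step cur.1 cur.2 m)) = acc ++ cur :: b :: q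
    rw [if_neg hne, hstep,
      ih k (acc ++ [cur]) b (by simp at hn ⊢; omega) htail hlast' (fun h => hmem (List.mem_cons_of_mem _ h))]
    simp

-- the three loops walk the same trajectory in lockstep
lemma lockstep (m bi ei : Int) (hm : 1 ≤ m) :
    ∀ (n : Nat) (p : List (Int × Int)) (pos : PySem.Dict (Int × Int) Int)
      (vis : PySem.Set (Int × Int)) (s : Int × Int),
    (∀ x, pos.get? x = (PySem.List.index? p x).map (fun k => (k : Int))) →
    (∀ x, PySem.Set.contains vis x = decide (x ∈ p)) →
    List.IsChain (fun a b => qa_step a.1 a.2 m = b) (p ++ [s]) →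
    p.Nodup →
    (∀ x ∈ p ++ [s], 1 ≤ x.1 ∧ x.1 ≤ m ∧ 1 ≤ x.2 ∧ x.2 ≤ m) →
    n + p.length = m.toNat * m.toNat + 1 →
    orbitInfoGo m n p pos s = (familyGo m bi ei n vis s, classifyGo m n p s) := by
  intro n
  induction n with
  | zero =>
    intro p pos vis s hpos hvis hchain hnd hr hfuel
    exfalso
    have hle := length_le_sq m p hnd (fun x hx => hr x (by simp [hx]))
    omega
  | succ n ih =>
    intro p pos vis s hpos hvis hchain hnd hr hfuel
    by_cases hmem : s ∈ p
    · -- the state repeats: all three loops stop here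
      obtain ⟨i, hi⟩ : ∃ i, PySem.List.index? p s = some i := by
        have h := (PySem.List.index?_isSome_iff p s).2 hmem
        exact Option.isSome_iff_exists.1 h
      obtain ⟨hilt, hgi, -⟩ := PySem.List.getElem_of_index?_eq_some hi
      have hcon : pos.contains s = true := by
        rw [PySem.Dict.contains_eq_isSome_get?, hpos s, hi]; rfl
      have hgetD : pos.getD s 0 = (i : Int) := by
        rw [PySem.Dict.getD_eq_get?_getD, hpos s, hi]; rfl
      have hvism : PySem.Set.contains vis s = true := by rw [hvis s]; simp [hmem]
      have hdrop : p.drop i = s :: p.drop (i + 1) := by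
        rw [List.drop_eq_getElem_cons hilt, hgi]
      have hlen : p.length ≤ m.toNat * m.toNat := by omega
      -- the cycle re-walk returns exactly the suffix of the path from the repeat point
      have hwalk : cycleWalk m s ((m * m + 1).toNat) [s] (qa_step s.1 s.2 m) = p.drop i := by
        have hchain2 : List.IsChain (fun a b => qa_step a.1 a.2 m = b) (p.drop i ++ [s]) := by
          have h := hchain
          rw [← List.take_append_drop i p, List.append_assoc] at h
          exact (List.isChain_append.1 h).2.1
        rw [hdrop] at hchain2
        cases htail : p.drop (i + 1) with
        | nil =>
          rw [htail] at hchain2 hdrop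
          -- the cycle has length 1: qa_step s = s
          have hss : qa_step s.1 s.2 m = s := by
            have := (List.isChain_cons.1 hchain2).1
            exact this s rfl
          obtain ⟨k, hk⟩ : ∃ k, (m * m + 1).toNat = k + 1 :=
            ⟨m.toNat * m.toNat, by rw [toNat_sq m hm]⟩
          rw [hk, hdrop]
          show (if qa_step s.1 s.2 m = s then [s] else _) = [s]
          rw [if_pos hss]
        | cons b t =>
          rw [htail] at hchain2 hdrop
          obtain ⟨hhead, hrest⟩ := List.isChain_cons.1 hchain2
          have hsb : qa_step s.1 s.2 m = b := hhead b rfl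
          obtain ⟨hcbt, -, hlastR⟩ := List.isChain_append.1 hrest
          have hlast : qa_step ((b :: t).getLast (by simp)).1 ((b :: t).getLast (by simp)).2 m = s := by
            apply hlastR
            · rw [Option.mem_def, List.getLast?_eq_some_getLast (by simp)]
            · rfl
          have hnodrop : (s :: b :: t).Nodup := by
            rw [← hdrop]; exact List.Nodup.sublist (List.drop_sublist i p) hnd
          have hsnot : s ∉ b :: t := by
            intro h; exact (List.nodup_cons.1 hnodrop).1 h
          have hfuel2 : t.length + 2 ≤ (m * m + 1).toNat := by
            have hld : (p.drop i).length = p.length - i := List.length_drop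
            rw [hdrop] at hld
            simp at hld
            rw [toNat_sq m hm]
            omega
          rw [hsb, cycleWalk_chain m s t _ [s] b hfuel2 hcbt hlast hsnot, hdrop]
          rfl
      have hslice : PySem.List.slice p (some ((i : Nat) : Int)) none = p.drop i :=
        PySem.List.slice_from_natCast p i
      -- evaluate the three branches
      show (if pos.contains s = true then _ else _) = _
      rw [if_pos hcon]
      show (((PySem.List.min2? (PySem.List.slice p (some (pos.getD s 0)) none) _ _).getD s),
            ((PySem.List.slice p (some (pos.getD s 0)) none).length : Int)) = _
      rw [hgetD, hslice]
      have hfam : familyGo m bi ei (n + 1) vis s =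
          (PySem.List.min2? (p.drop i) (fun p => p.1) (fun p => p.2)).getD s := by
        show (if PySem.Set.contains vis s = true then _ else _) = _
        rw [if_pos hvism, hwalk]
      have hcls : classifyGo m (n + 1) p s = (p.length : Int) - (i : Int) := by
        show (if s ∈ p then (p.length : Int) - (((PySem.List.index? p s).getD 0 : Nat) : Int) else _) = _
        rw [if_pos hmem, hi]
        rfl
      rw [hfam, hcls]
      have hld : (p.drop i).length = p.length - i := List.length_drop
      rw [Prod.mk.injEq]
      refine ⟨rfl, ?_⟩
      rw [hld]
      have hle2 : i ≤ p.length := le_of_lt hilt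
      omega
    · -- a fresh state: all three loops advance together
      have hcon : pos.contains s = false := by
        rw [PySem.Dict.contains_eq_isSome_get?, hpos s, (PySem.List.index?_eq_none_iff p s).2 hmem]
        rfl
      have hvism : PySem.Set.contains vis s = false := by rw [hvis s]; simp [hmem]
      have hstepdef : ∀ st : Int × Int,
          (PySem.Int.mod (st.1 + st.2 - 1) m + 1,
           PySem.Int.mod (st.2 + (PySem.Int.mod (st.1 + st.2 - 1) m + 1) - 1) m + 1) =
          qa_step st.1 st.2 m := by intro st; rfl
      show (if pos.contains s = true then _ else
            orbitInfoGo m n (p ++ [s]) (pos.insert s (p.length : Int)) _) = _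
      rw [if_neg (by simp [hcon])]
      have hfam : familyGo m bi ei (n + 1) vis s =
          familyGo m bi ei n (PySem.Set.add vis s) (qa_step s.1 s.2 m) := by
        show (if PySem.Set.contains vis s = true then _ else _) = _
        rw [if_neg (by rw [hvism]; simp)]
      have hcls : classifyGo m (n + 1) p s = classifyGo m n (p ++ [s]) (qa_step s.1 s.2 m) := by
        show (if s ∈ p then _ else _) = _
        rw [if_neg hmem]
      rw [hfam, hcls, hstepdef s]
      apply ih
      · intro x
        by_cases hx : x = s
        · subst hx
          rw [PySem.Dict.get?_insert_self, PySem.List.index?_append_singleton_self p x hmem]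
          rfl
        · rw [PySem.Dict.get?_insert_of_ne pos _ hx, hpos x]
          by_cases hxp : x ∈ p
          · rw [PySem.List.index?_append_of_mem [s] hxp]
          · rw [(PySem.List.index?_eq_none_iff p x).2 hxp,
              (PySem.List.index?_eq_none_iff (p ++ [s]) x).2 (by simp [hxp, hx])]
      · intro x
        have hmemadd := PySem.Set.mem_add vis s x
        by_cases hx : x ∈ p ++ [s]
        · simp only [hx, decide_true]
          rw [show PySem.Set.contains (PySem.Set.add vis s) x = true ↔ x ∈ PySem.Set.add vis s by
            simp [PySem.Set.contains]]
          rw [hmemadd]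
          rcases List.mem_append.1 hx with h | h
          · left
            have := hvis x
            simp [h] at this
            simpa [PySem.Set.contains] using this
          · right; simpa using h
        · simp only [hx, decide_false]
          rw [show PySem.Set.contains (PySem.Set.add vis s) x = false ↔ ¬ x ∈ PySem.Set.add vis s by
            simp [PySem.Set.contains]]
          rw [hmemadd]
          rintro (h | h)
          · have := hvis x
            have hxp : x ∉ p := fun hc => hx (by simp [hc])
            simp [hxp, PySem.Set.contains] at this
            exact absurd h (by simpa using this)
          · exact hx (by simp [h])
      · rw [List.isChain_append]
        refine ⟨hchain, by simp, ?_⟩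
        intro x hx y hy
        simp at hx
        simp at hy
        subst hx
        exact hy
      · simp [List.nodup_append, hnd]
        intro a b habp h
        exact hmem (h ▸ habp)
      · intro x hx
        rcases List.mem_append.1 hx with h | h
        · exact hr x (by simp at h ⊢; tauto)
        · simp at h
          subst h
          exact qa_step_mem m hm s.1 s.2
      · simp at hfuel ⊢
        omega

lemma orbitInfo_eq (m b e : Int) (hm : 1 ≤ m) (hb1 : 1 ≤ b) (hb2 : b ≤ m) (he1 : 1 ≤ e) (he2 : e ≤ m) :
    orbitInfo b e m = (orbit_family_id b e m, classify_orbit b e m) := by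
  unfold orbitInfo orbit_family_id classify_orbit
  apply lockstep m b e hm
  · intro x; simp [PySem.Dict.get?_empty, PySem.List.index?]
  · intro x; simp [PySem.Set.contains, PySem.Set.empty]
  · simp
  · exact List.nodup_nil
  · intro x hx; simp at hx; subst hx; exact ⟨hb1, hb2, he1, he2⟩
  · simp [toNat_sq m hm]

-- ===== VERDICT (by name: the statement is the Claim_ definition above) =====
theorem enumerate_orbits_spec : Claim_equal_enumerate_orbits := by
  intro m _
  unfold Spec_enumerate_orbits enumerate_orbits enumerate_orbits_alt
  by_cases hm : m ≤ 0
  · rw [PySem.List.pyRange_one_eq_nil (by omega)]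
    rfl
  · apply congrArg
    apply congrArg
    apply PySem.List.foldl_congr_mem
    intro fam b hbmem
    obtain ⟨hb1, hb2⟩ := PySem.List.mem_pyRange_one.1 hbmem
    apply PySem.List.foldl_congr_mem
    intro fam2 e hemem
    obtain ⟨he1, he2⟩ := PySem.List.mem_pyRange_one.1 hemem
    rw [orbitInfo_eq m b e (by omega) hb1 (by omega) he1 (by omega)]
    show ((if fam2.contains (orbit_family_id b e m) = false then
            fam2.insert (orbit_family_id b e m)
              (PySem.Dict.ofList [("cycle_length", classify_orbit b e m), ("count", 0)])
          else fam2).modify (orbit_family_id b e m) (PySem.Dict.ofList [])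
            (fun inner => inner.modify "count" 0 (· + 1)))
      = (if fam2.contains (orbit_family_id b e m) = true then
          fam2.modify (orbit_family_id b e m) (PySem.Dict.ofList [])
            (fun inner => inner.modify "count" 0 (· + 1))
        else fam2.insert (orbit_family_id b e m)
            (PySem.Dict.ofList [("cycle_length", classify_orbit b e m), ("count", 1)]))
    by_cases hc : fam2.contains (orbit_family_id b e m) = true
    · rw [if_neg (by rw [hc]; simp), if_pos hc]
    · have hc' : fam2.contains (orbit_family_id b e m) = false := by
        revert hc; cases fam2.contains (orbit_family_id b e m) <;> simp
      rw [if_pos hc', if_neg (by rw [hc']; simp)]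
      unfold PySem.Dict.modify
      rw [PySem.Dict.getD_insert_self, PySem.Dict.insert_insert_self]
      rfl
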